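-- pv_equiv track=rewrite | github.com/quantum-pecos/PECOS | python/quantum-pecos/src/pecos/qeclib/surface/patch_layouts/layout_4_4_4_4_rotated.py | gen_layout
-- ===== SOURCE A (Python) =====
-- def gen_layout(width: int, height: int):
--     """Generate rectangular rotated surface code patch layout for a 4.4.4.4 lattice."""
--     lattice_height = height * 2
--     lattice_width = width * 2
--
--     nodes = []
--     dual_nodes = []
--     polygons_0 = []
--     polygons_1 = []
--
--     for x in range(lattice_width + 1):
--         for y in range(lattice_height + 1):
--             if 0 < x < lattice_width and 0 < y < lattice_height:
--                 # Interior
--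
--                 if x % 2 == 1 and y % 2 == 1:  # That is, both coordinates are odd...
--                     nodes.append((x, y))
--
--                 elif x % 2 == 0 and y % 2 == 0:
--                     dual_nodes.append((x, y))
--                     poly = [
--                         (x - 1, y + 1),
--                         (x - 1, y - 1),
--                         (x + 1, y - 1),
--                         (x + 1, y + 1),
--                     ]
--                     polygons_1.append(poly)
--
--             elif 0 < x < lattice_width or 0 < y < lattice_height:
--                 # Not the corners or the interior
--
--                 if y == 0:
--                     # Top: X checks
--
--                     if x != 0 and x % 4 == 0:
--                         dual_nodes.append((x, y))
--                         poly = [(x, y), (x - 1, y + 1), (x + 1, y + 1)]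
--                         polygons_0.append(poly)
--
--                 elif x == 0:
--                     # Left column: X checks
--
--                     if (y - 2) % 4 == 0:
--                         dual_nodes.append((x, y))
--                         poly = [(x, y), (x + 1, y + 1), (x + 1, y - 1)]
--                         polygons_0.append(poly)
--
--                 if y == lattice_height:
--                     # Bottom: X checks
--
--                     if height % 2 == 0:
--                         if x != 0 and x % 4 == 0:
--                             dual_nodes.append((x, y))
--                             poly = [(x, y), (x - 1, y - 1), (x + 1, y - 1)]
--                             polygons_0.append(poly)
--
--                     else:
--                         if (x - 2) % 4 == 0:
--                             dual_nodes.append((x, y))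
--                             poly = [(x, y), (x - 1, y - 1), (x + 1, y - 1)]
--                             polygons_0.append(poly)
--
--                 elif x == lattice_width:
--                     # Right column: X checks
--
--                     if width % 2 == 1:
--                         if y != 0 and y % 4 == 0:
--                             dual_nodes.append((x, y))
--                             poly = [(x, y), (x - 1, y - 1), (x - 1, y + 1)]
--                             polygons_0.append(poly)
--                     else:
--                         if (y - 2) % 4 == 0:
--                             dual_nodes.append((x, y))
--                             poly = [(x, y), (x - 1, y - 1), (x - 1, y + 1)]
--                             polygons_0.append(poly)
--     polygons = []
--     polygons.extend(polygons_0)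
--     polygons.extend(polygons_1)
--
--     return nodes, dual_nodes, polygons
-- ===== SOURCE B (Python) =====
-- def gen_layout(width: int, height: int):
--     """Generate rectangular rotated surface code patch layout for a 4.4.4.4 lattice.
--
--     Region-by-region construction: the data qubits are the odd-odd interior
--     grid; each of the four boundary edges contributes weight-2 checks
--     (triangles) and the even-even interior contributes weight-4 checks
--     (squares); check nodes are merged in coordinate order."""
--     if width <= 0 or height <= 0:
--         return [], [], []
--     lw, lh = 2 * width, 2 * height
--
--     nodes = [(x, y) for x in range(1, lw, 2) for y in range(1, lh, 2)]
--
--     top = [((x, 0), [(x, 0), (x - 1, 1), (x + 1, 1)]) for x in range(4, lw, 4)]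
--     left = [((0, y), [(0, y), (1, y + 1), (1, y - 1)]) for y in range(2, lh, 4)]
--     bottom = [((x, lh), [(x, lh), (x - 1, lh - 1), (x + 1, lh - 1)])
--               for x in range(4 if height % 2 == 0 else 2, lw, 4)]
--     right = [((lw, y), [(lw, y), (lw - 1, y - 1), (lw - 1, y + 1)])
--              for y in range(4 if width % 2 == 1 else 2, lh, 4)]
--     edges = sorted(top + left + bottom + right, key=lambda c: c[0])
--
--     squares = [((x, y), [(x - 1, y + 1), (x - 1, y - 1), (x + 1, y - 1), (x + 1, y + 1)])
--                for x in range(2, lw, 2) for y in range(2, lh, 2)]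
--
--     dual_nodes = [n for n, _ in sorted(edges + squares, key=lambda c: c[0])]
--     polygons = [p for _, p in edges] + [p for _, p in squares]
--     return nodes, dual_nodes, polygons
-- ===== Notes on version B (the rewrite author's own statement) =====
-- stated objective: alternative
-- what changed: A scans all (2*width+1)*(2*height+1) lattice cells testing parity/boundary conditions at each; B never scans cells: it builds the data qubits as one comprehension over the odd-odd grid, builds each of the four boundary-edge check lists and the interior square-check list directly from closed-form ranges as (node, polygon) pairs, and recovers A's cell-scan emission order by one stable sort of the pairs on the node coordinate.
-- intended difference: On zero-area patches (width=0 with height>=2, or height=0 with width>=3) A returns boundary checks where the two coinciding opposite edges each emit the same check node, so every node appears twice and the second polygon has negative coordinates outside the lattice; B returns the empty layout ([], [], []), which is intended since such a patch has no data qubits and hence no checks. — e.g. on gen_layout(0, 2): A returns ([], [(0, 2), (0, 2)], [[(0, 2), (1, 3), (1, 1)], [(0, 2), (-1, 1), (-1, 3)]]), B returns ([], [], [])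
import Mathlib
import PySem

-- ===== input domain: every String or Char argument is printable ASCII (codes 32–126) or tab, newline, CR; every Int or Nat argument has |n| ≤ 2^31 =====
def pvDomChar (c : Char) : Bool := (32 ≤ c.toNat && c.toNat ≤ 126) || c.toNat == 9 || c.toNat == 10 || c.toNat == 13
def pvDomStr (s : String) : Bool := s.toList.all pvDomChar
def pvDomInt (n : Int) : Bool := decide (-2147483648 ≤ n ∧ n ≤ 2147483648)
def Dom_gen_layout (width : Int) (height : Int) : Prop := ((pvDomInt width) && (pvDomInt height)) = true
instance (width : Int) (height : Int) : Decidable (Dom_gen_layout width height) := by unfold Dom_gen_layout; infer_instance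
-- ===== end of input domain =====

-- B builds the layout region by region (odd-odd data grid, four boundary-edge check
-- lists, interior square checks) from closed-form ranges and merges the check nodes
-- with one stable sort, instead of scanning every lattice cell (objective: alternative).

-- ===== PORT A =====
-- state: (nodes, dual_nodes, polygons_0, polygons_1)
abbrev glStateA := (List (Int × Int)) × (List (Int × Int)) × (List (List (Int × Int))) × (List (List (Int × Int)))

def gl_chain1 (x y : Int) (s : glStateA) : glStateA :=
  if y = 0 then
    -- Top: X checks
    if x ≠ 0 ∧ PySem.Int.mod x 4 = 0 then
      (s.1, s.2.1 ++ [(x, y)], s.2.2.1 ++ [[(x, y), (x - 1, y + 1), (x + 1, y + 1)]], s.2.2.2)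
    else s
  else if x = 0 then
    -- Left column: X checks
    if PySem.Int.mod (y - 2) 4 = 0 then
      (s.1, s.2.1 ++ [(x, y)], s.2.2.1 ++ [[(x, y), (x + 1, y + 1), (x + 1, y - 1)]], s.2.2.2)
    else s
  else s

def gl_chain2 (lw lh height width x y : Int) (s : glStateA) : glStateA :=
  if y = lh then
    -- Bottom: X checks
    if PySem.Int.mod height 2 = 0 then
      if x ≠ 0 ∧ PySem.Int.mod x 4 = 0 then
        (s.1, s.2.1 ++ [(x, y)], s.2.2.1 ++ [[(x, y), (x - 1, y - 1), (x + 1, y - 1)]], s.2.2.2)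
      else s
    else
      if PySem.Int.mod (x - 2) 4 = 0 then
        (s.1, s.2.1 ++ [(x, y)], s.2.2.1 ++ [[(x, y), (x - 1, y - 1), (x + 1, y - 1)]], s.2.2.2)
      else s
  else if x = lw then
    -- Right column: X checks
    if PySem.Int.mod width 2 = 1 then
      if y ≠ 0 ∧ PySem.Int.mod y 4 = 0 then
        (s.1, s.2.1 ++ [(x, y)], s.2.2.1 ++ [[(x, y), (x - 1, y - 1), (x - 1, y + 1)]], s.2.2.2)
      else s
    else
      if PySem.Int.mod (y - 2) 4 = 0 then
        (s.1, s.2.1 ++ [(x, y)], s.2.2.1 ++ [[(x, y), (x - 1, y - 1), (x - 1, y + 1)]], s.2.2.2)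
      else s
  else s

def gl_stepA (lw lh height width x : Int) (s : glStateA) (y : Int) : glStateA :=
  if (0 < x ∧ x < lw) ∧ (0 < y ∧ y < lh) then
    -- Interior
    if PySem.Int.mod x 2 = 1 ∧ PySem.Int.mod y 2 = 1 then
      (s.1 ++ [(x, y)], s.2.1, s.2.2.1, s.2.2.2)
    else if PySem.Int.mod x 2 = 0 ∧ PySem.Int.mod y 2 = 0 then
      (s.1, s.2.1 ++ [(x, y)], s.2.2.1,
        s.2.2.2 ++ [[(x - 1, y + 1), (x - 1, y - 1), (x + 1, y - 1), (x + 1, y + 1)]])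
    else s
  else if (0 < x ∧ x < lw) ∨ (0 < y ∧ y < lh) then
    -- Not the corners or the interior: first chain (top / left), then second chain (bottom / right)
    gl_chain2 lw lh height width x y (gl_chain1 x y s)
  else s

def gen_layout (width : Int) (height : Int) :
    (List (Int × Int)) × (List (Int × Int)) × (List (List (Int × Int))) :=
  let lattice_height := height * 2
  let lattice_width := width * 2
  let r : glStateA :=
    (PySem.List.pyRange 0 (lattice_width + 1) 1).foldl
      (fun s x =>
        (PySem.List.pyRange 0 (lattice_height + 1) 1).foldl
          (gl_stepA lattice_width lattice_height height width x) s)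
      ([], [], [], [])
  (r.1, r.2.1, r.2.2.1 ++ r.2.2.2)

-- ===== PORT B =====
def gen_layout_alt (width : Int) (height : Int) :
    (List (Int × Int)) × (List (Int × Int)) × (List (List (Int × Int))) :=
  if width ≤ 0 ∨ height ≤ 0 then ([], [], [])
  else
    let lw := 2 * width
    let lh := 2 * height
    let nodes := (PySem.List.pyRange 1 lw 2).flatMap
      (fun x => (PySem.List.pyRange 1 lh 2).map (fun y => (x, y)))
    let top := (PySem.List.pyRange 4 lw 4).map
      (fun x => ((x, (0 : Int)), [(x, (0 : Int)), (x - 1, (1 : Int)), (x + 1, (1 : Int))]))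
    let left := (PySem.List.pyRange 2 lh 4).map
      (fun y => (((0 : Int), y), [((0 : Int), y), ((1 : Int), y + 1), ((1 : Int), y - 1)]))
    let bottom := (PySem.List.pyRange (if PySem.Int.mod height 2 = 0 then 4 else 2) lw 4).map
      (fun x => ((x, lh), [(x, lh), (x - 1, lh - 1), (x + 1, lh - 1)]))
    let right := (PySem.List.pyRange (if PySem.Int.mod width 2 = 1 then 4 else 2) lh 4).map
      (fun y => ((lw, y), [(lw, y), (lw - 1, y - 1), (lw - 1, y + 1)]))
    let edges := PySem.List.sorted2 (top ++ left ++ bottom ++ right)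
      (fun c => c.1.1) (fun c => c.1.2)
    let squares := (PySem.List.pyRange 2 lw 2).flatMap
      (fun x => (PySem.List.pyRange 2 lh 2).map
        (fun y => ((x, y), [(x - 1, y + 1), (x - 1, y - 1), (x + 1, y - 1), (x + 1, y + 1)])))
    let dual_nodes := (PySem.List.sorted2 (edges ++ squares)
      (fun c => c.1.1) (fun c => c.1.2)).map (fun c => c.1)
    (nodes, dual_nodes, edges.map (fun c => c.2) ++ squares.map (fun c => c.2))

-- ===== PRECONDITION & SPEC =====
-- On zero-area patches (width = 0 with height ≥ 2, or height = 0 with width ≥ 3) A returns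
-- boundary checks in which the two coinciding opposite edges each emit the same check node —
-- every node appears twice and the second polygon has negative coordinates outside the
-- lattice — while B returns the empty layout, intended since such a patch has no data qubits.
def D_gen_layout (width : Int) (height : Int) : Prop :=
  (width = 0 ∧ 2 ≤ height) ∨ (height = 0 ∧ 3 ≤ width)
instance (width : Int) (height : Int) : Decidable (D_gen_layout width height) := by
  unfold D_gen_layout; infer_instance

def Spec_gen_layout (width : Int) (height : Int)
    (out : (List (Int × Int)) × (List (Int × Int)) × (List (List (Int × Int)))) : Prop :=
  ¬ D_gen_layout width height → out = gen_layout_alt width height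
instance (width : Int) (height : Int)
    (out : (List (Int × Int)) × (List (Int × Int)) × (List (List (Int × Int)))) :
    Decidable (Spec_gen_layout width height out) := by unfold Spec_gen_layout; infer_instance

def pvDiffWitness_gen_layout : Int × Int := (0, 2)
def pvDiffWitnessOut_gen_layout :
    ((List (Int × Int)) × (List (Int × Int)) × (List (List (Int × Int)))) ×
      ((List (Int × Int)) × (List (Int × Int)) × (List (List (Int × Int)))) :=
  (([], [(0, 2), (0, 2)], [[(0, 2), (1, 3), (1, 1)], [(0, 2), (-1, 1), (-1, 3)]]),
   ([], [], []))

-- ===== CLAIM (what is proved, stated in full; the proofs are below) =====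
def Claim_unchanged_gen_layout : Prop :=
  ∀ (width : Int) (height : Int), Dom_gen_layout width height →
    Spec_gen_layout width height (gen_layout width height)
def Claim_changed_gen_layout : Prop :=
  Dom_gen_layout (pvDiffWitness_gen_layout.1) (pvDiffWitness_gen_layout.2) ∧
  D_gen_layout (pvDiffWitness_gen_layout.1) (pvDiffWitness_gen_layout.2) ∧
  gen_layout (pvDiffWitness_gen_layout.1) (pvDiffWitness_gen_layout.2) = pvDiffWitnessOut_gen_layout.1 ∧
  gen_layout_alt (pvDiffWitness_gen_layout.1) (pvDiffWitness_gen_layout.2) = pvDiffWitnessOut_gen_layout.2 ∧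
  pvDiffWitnessOut_gen_layout.1 ≠ pvDiffWitnessOut_gen_layout.2
def Claim_exact_gen_layout : Prop :=
  ∀ (width : Int) (height : Int), Dom_gen_layout width height → D_gen_layout width height →
    gen_layout width height ≠ gen_layout_alt width height

-- ===== LEMMAS AND PROOFS =====

lemma glRange_nil {a b s : Int} (hs : 0 < s) (h : b ≤ a) : PySem.List.pyRange a b s = [] := by
  rw [PySem.List.pyRange_of_pos a b hs, if_neg (by omega), List.range_zero, List.map_nil]

lemma glRange_cons {a b s : Int} (hs : 0 < s) (h : a < b) :
    PySem.List.pyRange a b s = a :: PySem.List.pyRange (a + s) b s := by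
  rw [PySem.List.pyRange_of_pos a b hs, PySem.List.pyRange_of_pos (a+s) b hs, if_pos h]
  have key : ((b - a + s - 1) / s).toNat
      = (if a + s < b then ((b - (a + s) + s - 1) / s).toNat else 0) + 1 := by
    by_cases hb : a + s < b
    · rw [if_pos hb]
      have h1 : b - a + s - 1 = (b - (a + s) + s - 1) + 1 * s := by ring
      rw [h1, Int.add_mul_ediv_right _ _ (by omega)]
      have h2 : (0:Int) ≤ (b - (a + s) + s - 1) / s := Int.ediv_nonneg (by omega) (by omega)
      omega
    · rw [if_neg hb]
      have h1 : b - a + s - 1 = (b - a - 1) + 1 * s := by ring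
      rw [h1, Int.add_mul_ediv_right _ _ (by omega)]
      have h2 : (b - a - 1) / s = 0 := Int.ediv_eq_zero_of_lt (by omega) (by omega)
      omega
  rw [key, List.range_succ_eq_map, List.map_cons, List.map_map]
  refine List.cons_eq_cons.2 ⟨by simp, ?_⟩
  apply List.map_congr_left
  intro k _
  simp [Function.comp, Nat.succ_eq_add_one]
  ring

lemma glRange_append_aux {s : Int} (hs : 0 < s) :
    ∀ (j : Nat) (a m b : Int), m - a ≤ (j : Int) → s ∣ m - a → a ≤ m → m ≤ b →
    PySem.List.pyRange a b s = PySem.List.pyRange a m s ++ PySem.List.pyRange m b s := by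
  intro j
  induction j with
  | zero =>
      intro a m b hj hd h1 h2
      have : a = m := by omega
      subst this
      rw [glRange_nil hs le_rfl, List.nil_append]
  | succ j ih =>
      intro a m b hj hd h1 h2
      by_cases ham : a = m
      · subst ham; rw [glRange_nil hs le_rfl, List.nil_append]
      · have hsle : s ≤ m - a := Int.le_of_dvd (by omega) hd
        obtain ⟨u, hu⟩ := hd
        rw [glRange_cons (a := a) (b := b) hs (by omega),
          glRange_cons (a := a) (b := m) hs (by omega),
          ih (a + s) m b (by omega) ⟨u - 1, by rw [mul_sub, mul_one]; omega⟩ (by omega) h2]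
        simp

lemma glRange_append {a m b s : Int} (hs : 0 < s) (hd : s ∣ m - a) (h1 : a ≤ m) (h2 : m ≤ b) :
    PySem.List.pyRange a b s = PySem.List.pyRange a m s ++ PySem.List.pyRange m b s :=
  glRange_append_aux hs (m - a).toNat a m b (by omega) hd h1 h2

lemma glModPred {t s : Int} (hs : 0 < s) (h : t % s ≠ 0) : (t - 1) % s = t % s - 1 := by
  have h1 : 0 ≤ t % s := Int.emod_nonneg t (by omega)
  have h2 : t % s < s := Int.emod_lt_of_pos t hs
  by_cases h4 : s = 1
  · subst h4; simp at h
  · have h5 : (1:Int) % s = 1 := Int.emod_eq_of_lt (by omega) (by omega)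
    rw [Int.sub_emod, h5, Int.emod_eq_of_lt (by omega) (by omega)]

lemma glModPred0 {t s : Int} (hs : 0 < s) (h : t % s = 0) : (t - 1) % s = s - 1 := by
  by_cases h4 : s = 1
  · subst h4; simp
  · have h5 : (1:Int) % s = 1 := Int.emod_eq_of_lt (by omega) (by omega)
    have h6 : ((-1 : Int) + s * 1) % s = (-1 : Int) % s := Int.add_mul_emod_self_left (-1) s 1
    have h7 : ((-1 : Int) + s * 1) % s = s - 1 := by
      rw [show (-1 : Int) + s * 1 = s - 1 by ring]
      exact Int.emod_eq_of_lt (by omega) (by omega)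
    rw [Int.sub_emod, h5, h, show ((0:Int) - 1) = (-1 : Int) by ring]
    exact h6.symm.trans h7

lemma glThin {α : Type} {s : Int} (hs : 0 < s) :
    ∀ (k : Nat) (m n c : Int) (g : Int → List α), n - m ≤ (k : Int) →
    (∀ y, m ≤ y → y < n → g y ≠ [] → y % s = c % s) →
    (PySem.List.pyRange m n 1).flatMap g
      = (PySem.List.pyRange (m + (c - m) % s) n s).flatMap g := by
  intro k
  induction k with
  | zero =>
      intro m n c g hk hv
      rw [PySem.List.pyRange_one_eq_nil (by omega),
        glRange_nil hs (by have h9 : 0 ≤ (c - m) % s := Int.emod_nonneg _ (by omega); omega)]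
  | succ k ih =>
      intro m n c g hk hv
      by_cases hmn : n ≤ m
      · rw [PySem.List.pyRange_one_eq_nil hmn,
          glRange_nil hs (by have h9 : 0 ≤ (c - m) % s := Int.emod_nonneg _ (by omega); omega)]
      · rw [PySem.List.pyRange_one_cons (by omega), List.flatMap_cons]
        have ihe := ih (m + 1) n c g (by omega) (fun y h1 h2 => hv y (by omega) h2)
        by_cases hm : (c - m) % s = 0
        · rw [hm, add_zero, glRange_cons hs (by omega), List.flatMap_cons, ihe,
            show c - (m + 1) = (c - m) - 1 by ring, glModPred0 hs hm,
            show m + 1 + (s - 1) = m + s by ring]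
        · have hgm : g m = [] := by
            by_contra hne
            have h1 := hv m le_rfl (by omega) hne
            have h2 : (c - m) % s = 0 := Int.emod_eq_emod_iff_emod_sub_eq_zero.mp h1.symm
            exact hm h2
          rw [hgm, List.nil_append, ihe,
            show c - (m + 1) = (c - m) - 1 by ring, glModPred hs hm,
            show m + 1 + ((c - m) % s - 1) = m + (c - m) % s by ring]

lemma glClipTop {α : Type} {s : Int} (hs : 0 < s) :
    ∀ (k : Nat) (a b b' : Int) (g : Int → List α), b - a ≤ (k : Int) → b' ≤ b → b ≤ b' + s →
    (∀ y, b' ≤ y → g y = []) →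
    (PySem.List.pyRange a b s).flatMap g = (PySem.List.pyRange a b' s).flatMap g := by
  intro k
  induction k with
  | zero =>
      intro a b b' g hk h1 h2 hg
      rw [glRange_nil hs (by omega), glRange_nil hs (by omega)]
  | succ k ih =>
      intro a b b' g hk h1 h2 hg
      by_cases hab : b ≤ a
      · rw [glRange_nil hs hab, glRange_nil hs (by omega)]
      · by_cases hab' : a < b'
        · rw [glRange_cons hs (by omega), glRange_cons hs hab', List.flatMap_cons,
            List.flatMap_cons, ih (a + s) b b' g (by omega) h1 h2 hg]
        · rw [glRange_cons hs (by omega), List.flatMap_cons, hg a (by omega),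
            List.nil_append, glRange_nil hs (by omega), glRange_nil hs (by omega),
            List.flatMap_nil]

lemma glClipBot {α : Type} {a b s : Int} (hs : 0 < s) (g : Int → List α) (hg : g a = []) :
    (PySem.List.pyRange a b s).flatMap g = (PySem.List.pyRange (a + s) b s).flatMap g := by
  by_cases hab : a < b
  · rw [glRange_cons hs hab, List.flatMap_cons, hg, List.nil_append]
  · rw [glRange_nil hs (by omega), glRange_nil hs (by omega)]

lemma glFoldl4 {f1 f2 : Int → List (Int × Int)} {f3 f4 : Int → List (List (Int × Int))} :
    ∀ (L : List Int) (s : glStateA),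
    L.foldl (fun s y => (s.1 ++ f1 y, s.2.1 ++ f2 y, s.2.2.1 ++ f3 y, s.2.2.2 ++ f4 y)) s
      = (s.1 ++ L.flatMap f1, s.2.1 ++ L.flatMap f2, s.2.2.1 ++ L.flatMap f3, s.2.2.2 ++ L.flatMap f4) := by
  intro L
  induction L with
  | nil => intro s; simp
  | cons y L ih => intro s; simp [ih, List.append_assoc]

-- emissions of A's inner-loop body at cell (x, y), one list per accumulator
def eN (lw lh x y : Int) : List (Int × Int) :=
  if (0 < x ∧ x < lw) ∧ (0 < y ∧ y < lh) then
    (if PySem.Int.mod x 2 = 1 ∧ PySem.Int.mod y 2 = 1 then [(x, y)] else [])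
  else []

def glC1d (x y : Int) : List (Int × Int) :=
  if y = 0 then (if x ≠ 0 ∧ PySem.Int.mod x 4 = 0 then [(x, y)] else [])
  else if x = 0 then (if PySem.Int.mod (y - 2) 4 = 0 then [(x, y)] else [])
  else []

def glC2d (lw lh height width x y : Int) : List (Int × Int) :=
  if y = lh then
    (if PySem.Int.mod height 2 = 0 then (if x ≠ 0 ∧ PySem.Int.mod x 4 = 0 then [(x, y)] else [])
     else (if PySem.Int.mod (x - 2) 4 = 0 then [(x, y)] else []))
  else if x = lw then
    (if PySem.Int.mod width 2 = 1 then (if y ≠ 0 ∧ PySem.Int.mod y 4 = 0 then [(x, y)] else [])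
     else (if PySem.Int.mod (y - 2) 4 = 0 then [(x, y)] else []))
  else []

def eD (lw lh height width x y : Int) : List (Int × Int) :=
  if (0 < x ∧ x < lw) ∧ (0 < y ∧ y < lh) then
    (if PySem.Int.mod x 2 = 1 ∧ PySem.Int.mod y 2 = 1 then []
     else if PySem.Int.mod x 2 = 0 ∧ PySem.Int.mod y 2 = 0 then [(x, y)] else [])
  else if (0 < x ∧ x < lw) ∨ (0 < y ∧ y < lh) then
    glC1d x y ++ glC2d lw lh height width x y
  else []

def glC1p (x y : Int) : List (List (Int × Int)) :=
  if y = 0 then (if x ≠ 0 ∧ PySem.Int.mod x 4 = 0 then [[(x, y), (x - 1, y + 1), (x + 1, y + 1)]] else [])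
  else if x = 0 then (if PySem.Int.mod (y - 2) 4 = 0 then [[(x, y), (x + 1, y + 1), (x + 1, y - 1)]] else [])
  else []

def glC2p (lw lh height width x y : Int) : List (List (Int × Int)) :=
  if y = lh then
    (if PySem.Int.mod height 2 = 0 then
       (if x ≠ 0 ∧ PySem.Int.mod x 4 = 0 then [[(x, y), (x - 1, y - 1), (x + 1, y - 1)]] else [])
     else (if PySem.Int.mod (x - 2) 4 = 0 then [[(x, y), (x - 1, y - 1), (x + 1, y - 1)]] else []))
  else if x = lw then
    (if PySem.Int.mod width 2 = 1 then
       (if y ≠ 0 ∧ PySem.Int.mod y 4 = 0 then [[(x, y), (x - 1, y - 1), (x - 1, y + 1)]] else [])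
     else (if PySem.Int.mod (y - 2) 4 = 0 then [[(x, y), (x - 1, y - 1), (x - 1, y + 1)]] else []))
  else []

def eP0 (lw lh height width x y : Int) : List (List (Int × Int)) :=
  if (0 < x ∧ x < lw) ∧ (0 < y ∧ y < lh) then []
  else if (0 < x ∧ x < lw) ∨ (0 < y ∧ y < lh) then
    glC1p x y ++ glC2p lw lh height width x y
  else []

def eP1 (lw lh x y : Int) : List (List (Int × Int)) :=
  if (0 < x ∧ x < lw) ∧ (0 < y ∧ y < lh) then
    (if PySem.Int.mod x 2 = 1 ∧ PySem.Int.mod y 2 = 1 then []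
     else if PySem.Int.mod x 2 = 0 ∧ PySem.Int.mod y 2 = 0 then
       [[(x - 1, y + 1), (x - 1, y - 1), (x + 1, y - 1), (x + 1, y + 1)]]
     else [])
  else []

lemma chain1_eq (x y : Int) (s : glStateA) :
    gl_chain1 x y s = (s.1, s.2.1 ++ glC1d x y, s.2.2.1 ++ glC1p x y, s.2.2.2) := by
  obtain ⟨n, d, p0, p1⟩ := s
  simp only [gl_chain1, glC1d, glC1p]
  split_ifs <;> simp

lemma chain2_eq (lw lh height width x y : Int) (s : glStateA) :
    gl_chain2 lw lh height width x y s
      = (s.1, s.2.1 ++ glC2d lw lh height width x y, s.2.2.1 ++ glC2p lw lh height width x y, s.2.2.2) := by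
  obtain ⟨n, d, p0, p1⟩ := s
  simp only [gl_chain2, glC2d, glC2p]
  split_ifs <;> simp

lemma stepA_fun (lw lh height width x : Int) :
    gl_stepA lw lh height width x = fun (s : glStateA) (y : Int) =>
      (s.1 ++ eN lw lh x y, s.2.1 ++ eD lw lh height width x y,
       s.2.2.1 ++ eP0 lw lh height width x y, s.2.2.2 ++ eP1 lw lh x y) := by
  funext s y
  obtain ⟨n, d, p0, p1⟩ := s
  simp only [gl_stepA, eN, eD, eP0, eP1, chain1_eq, chain2_eq]
  split_ifs <;> simp [List.append_assoc]

-- A's accumulators after a full column x, as flat lists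
def fN (lw lh x : Int) : List (Int × Int) :=
  (PySem.List.pyRange 0 (lh + 1) 1).flatMap (eN lw lh x)
def fD (lw lh height width x : Int) : List (Int × Int) :=
  (PySem.List.pyRange 0 (lh + 1) 1).flatMap (eD lw lh height width x)
def fP0 (lw lh height width x : Int) : List (List (Int × Int)) :=
  (PySem.List.pyRange 0 (lh + 1) 1).flatMap (eP0 lw lh height width x)
def fP1 (lw lh x : Int) : List (List (Int × Int)) :=
  (PySem.List.pyRange 0 (lh + 1) 1).flatMap (eP1 lw lh x)

lemma genA_eq (width height : Int) :
    gen_layout width height =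
      ((PySem.List.pyRange 0 (2 * width + 1) 1).flatMap (fun x => fN (2 * width) (2 * height) x),
       (PySem.List.pyRange 0 (2 * width + 1) 1).flatMap
         (fun x => fD (2 * width) (2 * height) height width x),
       (PySem.List.pyRange 0 (2 * width + 1) 1).flatMap
         (fun x => fP0 (2 * width) (2 * height) height width x)
         ++ (PySem.List.pyRange 0 (2 * width + 1) 1).flatMap
              (fun x => fP1 (2 * width) (2 * height) x)) := by
  simp only [gen_layout, stepA_fun, glFoldl4, List.nil_append, fN, fD, fP0, fP1,
    show width * 2 = 2 * width from mul_comm width 2,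
    show height * 2 = 2 * height from mul_comm height 2]

lemma glMod2 (a : Int) : PySem.Int.mod a 2 = a % 2 := PySem.Int.mod_eq_emod_of_pos (by norm_num)
lemma glMod4 (a : Int) : PySem.Int.mod a 4 = a % 4 := PySem.Int.mod_eq_emod_of_pos (by norm_num)

lemma glThin0 {α : Type} (g : Int → List α) (s c n : Int) (hs : 0 < s)
    (hv : ∀ y, 0 ≤ y → y < n → g y ≠ [] → y % s = c % s) :
    (PySem.List.pyRange 0 n 1).flatMap g = (PySem.List.pyRange (c % s) n s).flatMap g := by
  have h := glThin hs n.toNat 0 n c g (by omega) (fun y h1 h2 => hv y h1 h2)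
  rwa [Int.sub_zero, zero_add] at h

lemma glClipTop' {α : Type} (g : Int → List α) (s b b' a : Int) (hs : 0 < s)
    (h1 : b' ≤ b) (h2 : b ≤ b' + s) (hg : ∀ y, b' ≤ y → g y = []) :
    (PySem.List.pyRange a b s).flatMap g = (PySem.List.pyRange a b' s).flatMap g :=
  glClipTop hs (b - a).toNat a b b' g (by omega) h1 h2 hg

-- ===== B-side proof objects: the per-region (node, polygon) pair lists =====
abbrev glPair := (Int × Int) × List (Int × Int)

def tP (x : Int) : List glPair :=
  if x % 4 = 0 then [((x, 0), [(x, 0), (x - 1, 1), (x + 1, 1)])] else []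
def bPc (height lh x : Int) : List glPair :=
  if x % 4 = (if height % 2 = 0 then 0 else 2) then
    [((x, lh), [(x, lh), (x - 1, lh - 1), (x + 1, lh - 1)])] else []
def sP (lh x : Int) : List glPair :=
  (PySem.List.pyRange 2 lh 2).map
    (fun y => ((x, y), [(x - 1, y + 1), (x - 1, y - 1), (x + 1, y - 1), (x + 1, y + 1)]))
def lPc (lh : Int) : List glPair :=
  (PySem.List.pyRange 2 lh 4).map (fun y => (((0:Int), y), [((0:Int), y), ((1:Int), y + 1), ((1:Int), y - 1)]))
def rPc (width lw lh : Int) : List glPair :=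
  (PySem.List.pyRange (if PySem.Int.mod width 2 = 1 then 4 else 2) lh 4).map
    (fun y => ((lw, y), [(lw, y), (lw - 1, y - 1), (lw - 1, y + 1)]))

def colM (height lh x : Int) : List glPair := tP x ++ sP lh x ++ bPc height lh x

def glM (width height lw lh : Int) : List glPair :=
  lPc lh ++ (PySem.List.pyRange 2 lw 2).flatMap (colM height lh) ++ rPc width lw lh
def glE (width height lw lh : Int) : List glPair :=
  lPc lh ++ (PySem.List.pyRange 2 lw 2).flatMap (fun x => tP x ++ bPc height lh x) ++ rPc width lw lh

abbrev glLex (p q : glPair) : Prop := p.1.1 < q.1.1 ∨ (p.1.1 = q.1.1 ∧ p.1.2 < q.1.2)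

-- ===== per-column closed forms of A's scan =====

lemma colSplit {α : Type} (g : Int → List α) {lh : Int} (hlh : 0 ≤ lh) (he : lh % 2 = 0) :
    (PySem.List.pyRange 0 (lh + 1) 2).flatMap g
      = (if 0 < lh then g 0 else []) ++ ((PySem.List.pyRange 2 lh 2).flatMap g ++ g lh) := by
  rw [glRange_append (m := lh) (by norm_num) (by omega) hlh (by omega),
    glRange_cons (a := lh) (by norm_num) (by omega), glRange_nil (a := lh + 2) (by norm_num) (by omega)]
  by_cases h0 : 0 < lh
  · rw [glRange_cons (a := 0) (by norm_num) (by omega), if_pos h0]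
    simp
  · rw [glRange_nil (a := 0) (by norm_num) (by omega), if_neg h0,
      glRange_nil (a := 2) (by norm_num) (by omega)]
    simp

lemma midD (width height x : Int) (hh : 1 ≤ height) (hx0 : 0 < x) (hxl : x < 2 * width)
    (hx2 : x % 2 = 0) :
    fD (2 * width) (2 * height) height width x = (colM height (2 * height) x).map Prod.fst := by
  simp only [fD]
  rw [glThin0 _ 2 0 (2 * height + 1) (by norm_num) (fun y hy0 hyn hne => by
      by_contra hodd
      apply hne
      simp only [eD, glC1d, glC2d, glMod2, glMod4]
      split_ifs <;> first | omega | rfl | simp),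
    show ((0:Int) % 2) = 0 by norm_num, colSplit _ (by omega) (by omega)]
  have hmid : (PySem.List.pyRange 2 (2 * height) 2).flatMap (eD (2 * width) (2 * height) height width x)
      = (PySem.List.pyRange 2 (2 * height) 2).map (fun y => (x, y)) := by
    rw [List.map_eq_flatMap]
    apply List.flatMap_congr
    intro y hy
    obtain ⟨hy1, hy2, j, hj⟩ := (PySem.List.mem_pyRange_iff_of_pos (by norm_num) y).mp hy
    simp only [eD, glMod2]
    split_ifs <;> first | rfl | omega
  rw [hmid]
  have htop : eD (2 * width) (2 * height) height width x 0
      = (if x % 4 = 0 then [(x, 0)] else []) := by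
    simp only [eD, glC1d, glC2d, glMod2, glMod4]
    split_ifs <;> first | omega | rfl | simp
  have hbot : eD (2 * width) (2 * height) height width x (2 * height)
      = (if x % 4 = (if height % 2 = 0 then 0 else 2) then [(x, 2 * height)] else []) := by
    simp only [eD, glC1d, glC2d, glMod2, glMod4]
    split_ifs <;> first | omega | rfl | simp
  rw [if_pos (by omega), htop, hbot]
  simp only [colM, tP, bPc, sP, List.map_append, List.map_map, apply_ite (List.map Prod.fst),
    List.map_cons, List.map_nil]
  simp [Function.comp, List.append_assoc]

set_option maxHeartbeats 1600000 in
lemma midP0 (width height x : Int) (hh : 1 ≤ height) (hx0 : 0 < x) (hxl : x < 2 * width)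
    (hx2 : x % 2 = 0) :
    fP0 (2 * width) (2 * height) height width x = (tP x ++ bPc height (2 * height) x).map Prod.snd := by
  simp only [fP0]
  rw [glThin0 _ 2 0 (2 * height + 1) (by norm_num) (fun y hy0 hyn hne => by
      by_contra hodd
      apply hne
      simp only [eP0, glC1p, glC2p, glMod2, glMod4]
      split_ifs <;> first | omega | rfl | simp),
    show ((0:Int) % 2) = 0 by norm_num, colSplit _ (by omega) (by omega)]
  have hmid : (PySem.List.pyRange 2 (2 * height) 2).flatMap (eP0 (2 * width) (2 * height) height width x)
      = [] := by
    apply List.flatMap_eq_nil_iff.mpr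
    intro y hy
    obtain ⟨hy1, hy2, j, hj⟩ := (PySem.List.mem_pyRange_iff_of_pos (by norm_num) y).mp hy
    simp only [eP0, glC1p, glC2p, glMod2, glMod4]
    split_ifs <;> first | omega | rfl | simp
  rw [hmid]
  have htop : eP0 (2 * width) (2 * height) height width x 0
      = (if x % 4 = 0 then [[(x, 0), (x - 1, 1), (x + 1, 1)]] else []) := by
    simp only [eP0, glC1p, glC2p, glMod2, glMod4]
    split_ifs <;> first | omega | rfl | simp
  have hbot : eP0 (2 * width) (2 * height) height width x (2 * height)
      = (if x % 4 = (if height % 2 = 0 then 0 else 2) then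
          [[(x, 2 * height), (x - 1, 2 * height - 1), (x + 1, 2 * height - 1)]] else []) := by
    simp only [eP0, glC1p, glC2p, glMod2, glMod4]
    split_ifs <;> first | omega | rfl | simp
  rw [if_pos (by omega), htop, hbot]
  simp only [tP, bPc, List.map_append, apply_ite (List.map Prod.snd), List.map_cons, List.map_nil]
  simp

lemma midP1 (width height x : Int) (hh : 1 ≤ height) (hx0 : 0 < x) (hxl : x < 2 * width)
    (hx2 : x % 2 = 0) :
    fP1 (2 * width) (2 * height) x = (sP (2 * height) x).map Prod.snd := by
  simp only [fP1]
  rw [glThin0 _ 2 0 (2 * height + 1) (by norm_num) (fun y hy0 hyn hne => by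
      by_contra hodd
      apply hne
      simp only [eP1, glMod2]
      split_ifs <;> first | omega | rfl),
    show ((0:Int) % 2) = 0 by norm_num, colSplit _ (by omega) (by omega)]
  have htop : eP1 (2 * width) (2 * height) x 0 = [] := by
    simp only [eP1]
    split_ifs <;> first | omega | rfl
  have hbot : eP1 (2 * width) (2 * height) x (2 * height) = [] := by
    simp only [eP1]
    split_ifs <;> first | omega | rfl
  have hmid : (PySem.List.pyRange 2 (2 * height) 2).flatMap (eP1 (2 * width) (2 * height) x)
      = (PySem.List.pyRange 2 (2 * height) 2).map
          (fun y => [(x - 1, y + 1), (x - 1, y - 1), (x + 1, y - 1), (x + 1, y + 1)]) := by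
    rw [List.map_eq_flatMap]
    apply List.flatMap_congr
    intro y hy
    obtain ⟨hy1, hy2, j, hj⟩ := (PySem.List.mem_pyRange_iff_of_pos (by norm_num) y).mp hy
    simp only [eP1, glMod2]
    split_ifs <;> first | omega | rfl
  rw [htop, hbot, hmid]
  simp [sP, List.map_map, Function.comp]

lemma leftD (width height : Int) (hw : 1 ≤ width) (hh : 0 ≤ height) :
    fD (2 * width) (2 * height) height width 0 = (lPc (2 * height)).map Prod.fst := by
  simp only [fD]
  rw [glThin0 _ 4 2 (2 * height + 1) (by norm_num) (fun y hy0 hyn hne => by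
      by_contra hm
      apply hne
      simp only [eD, glC1d, glC2d, glMod2, glMod4]
      split_ifs <;> first | omega | rfl | simp),
    show ((2:Int) % 4) = 2 by norm_num,
    glClipTop' _ 4 (2 * height + 1) (2 * height) 2 (by norm_num) (by omega) (by omega)
      (fun y hy => by
        simp only [eD, glC1d, glC2d, glMod2, glMod4]
        split_ifs <;> first | omega | rfl | simp)]
  simp only [lPc, List.map_map]
  rw [List.map_eq_flatMap]
  apply List.flatMap_congr
  intro y hy
  obtain ⟨hy1, hy2, j, hj⟩ := (PySem.List.mem_pyRange_iff_of_pos (by norm_num) y).mp hy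
  simp only [eD, glC1d, glC2d, glMod2, glMod4, Function.comp]
  split_ifs <;> first | omega | rfl | simp

lemma leftP0 (width height : Int) (hw : 1 ≤ width) (hh : 0 ≤ height) :
    fP0 (2 * width) (2 * height) height width 0 = (lPc (2 * height)).map Prod.snd := by
  simp only [fP0]
  rw [glThin0 _ 4 2 (2 * height + 1) (by norm_num) (fun y hy0 hyn hne => by
      by_contra hm
      apply hne
      simp only [eP0, glC1p, glC2p, glMod2, glMod4]
      split_ifs <;> first | omega | rfl | simp),
    show ((2:Int) % 4) = 2 by norm_num,
    glClipTop' _ 4 (2 * height + 1) (2 * height) 2 (by norm_num) (by omega) (by omega)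
      (fun y hy => by
        simp only [eP0, glC1p, glC2p, glMod2, glMod4]
        split_ifs <;> first | omega | rfl | simp)]
  simp only [lPc, List.map_map]
  rw [List.map_eq_flatMap]
  apply List.flatMap_congr
  intro y hy
  obtain ⟨hy1, hy2, j, hj⟩ := (PySem.List.mem_pyRange_iff_of_pos (by norm_num) y).mp hy
  simp only [eP0, glC1p, glC2p, glMod2, glMod4, Function.comp]
  split_ifs <;> first | omega | rfl | simp

lemma rightD (width height : Int) (hw : 0 < width) (hh : 0 ≤ height) :
    fD (2 * width) (2 * height) height width (2 * width)
      = (rPc width (2 * width) (2 * height)).map Prod.fst := by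
  simp only [fD, rPc, glMod2, List.map_map]
  by_cases hwp : width % 2 = 1
  · rw [if_pos hwp,
      glThin0 _ 4 0 (2 * height + 1) (by norm_num) (fun y hy0 hyn hne => by
        by_contra hm
        apply hne
        simp only [eD, glC1d, glC2d, glMod2, glMod4]
        split_ifs <;> first | omega | rfl | simp),
      show ((0:Int) % 4) = 0 by norm_num,
      glClipBot (by norm_num) _ (by
        simp only [eD, glC1d, glC2d, glMod2, glMod4]
        split_ifs <;> first | omega | rfl | simp),
      show ((0:Int) + 4) = 4 by norm_num,
      glClipTop' _ 4 (2 * height + 1) (2 * height) 4 (by norm_num) (by omega) (by omega)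
        (fun y hy => by
          simp only [eD, glC1d, glC2d, glMod2, glMod4]
          split_ifs <;> first | omega | rfl | simp),
      List.map_eq_flatMap]
    apply List.flatMap_congr
    intro y hy
    obtain ⟨hy1, hy2, j, hj⟩ := (PySem.List.mem_pyRange_iff_of_pos (by norm_num) y).mp hy
    simp only [eD, glC1d, glC2d, glMod2, glMod4, Function.comp]
    split_ifs <;> first | omega | rfl | simp
  · rw [if_neg hwp,
      glThin0 _ 4 2 (2 * height + 1) (by norm_num) (fun y hy0 hyn hne => by
        by_contra hm
        apply hne
        simp only [eD, glC1d, glC2d, glMod2, glMod4]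
        split_ifs <;> first | omega | rfl | simp),
      show ((2:Int) % 4) = 2 by norm_num,
      glClipTop' _ 4 (2 * height + 1) (2 * height) 2 (by norm_num) (by omega) (by omega)
        (fun y hy => by
          simp only [eD, glC1d, glC2d, glMod2, glMod4]
          split_ifs <;> first | omega | rfl | simp),
      List.map_eq_flatMap]
    apply List.flatMap_congr
    intro y hy
    obtain ⟨hy1, hy2, j, hj⟩ := (PySem.List.mem_pyRange_iff_of_pos (by norm_num) y).mp hy
    simp only [eD, glC1d, glC2d, glMod2, glMod4, Function.comp]
    split_ifs <;> first | omega | rfl | simp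

lemma rightP0 (width height : Int) (hw : 0 < width) (hh : 0 ≤ height) :
    fP0 (2 * width) (2 * height) height width (2 * width)
      = (rPc width (2 * width) (2 * height)).map Prod.snd := by
  simp only [fP0, rPc, glMod2, List.map_map]
  by_cases hwp : width % 2 = 1
  · rw [if_pos hwp,
      glThin0 _ 4 0 (2 * height + 1) (by norm_num) (fun y hy0 hyn hne => by
        by_contra hm
        apply hne
        simp only [eP0, glC1p, glC2p, glMod2, glMod4]
        split_ifs <;> first | omega | rfl | simp),
      show ((0:Int) % 4) = 0 by norm_num,
      glClipBot (by norm_num) _ (by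
        simp only [eP0, glC1p, glC2p, glMod2, glMod4]
        split_ifs <;> first | omega | rfl | simp),
      show ((0:Int) + 4) = 4 by norm_num,
      glClipTop' _ 4 (2 * height + 1) (2 * height) 4 (by norm_num) (by omega) (by omega)
        (fun y hy => by
          simp only [eP0, glC1p, glC2p, glMod2, glMod4]
          split_ifs <;> first | omega | rfl | simp),
      List.map_eq_flatMap]
    apply List.flatMap_congr
    intro y hy
    obtain ⟨hy1, hy2, j, hj⟩ := (PySem.List.mem_pyRange_iff_of_pos (by norm_num) y).mp hy
    simp only [eP0, glC1p, glC2p, glMod2, glMod4, Function.comp]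
    split_ifs <;> first | omega | rfl | simp
  · rw [if_neg hwp,
      glThin0 _ 4 2 (2 * height + 1) (by norm_num) (fun y hy0 hyn hne => by
        by_contra hm
        apply hne
        simp only [eP0, glC1p, glC2p, glMod2, glMod4]
        split_ifs <;> first | omega | rfl | simp),
      show ((2:Int) % 4) = 2 by norm_num,
      glClipTop' _ 4 (2 * height + 1) (2 * height) 2 (by norm_num) (by omega) (by omega)
        (fun y hy => by
          simp only [eP0, glC1p, glC2p, glMod2, glMod4]
          split_ifs <;> first | omega | rfl | simp),
      List.map_eq_flatMap]
    apply List.flatMap_congr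
    intro y hy
    obtain ⟨hy1, hy2, j, hj⟩ := (PySem.List.mem_pyRange_iff_of_pos (by norm_num) y).mp hy
    simp only [eP0, glC1p, glC2p, glMod2, glMod4, Function.comp]
    split_ifs <;> first | omega | rfl | simp

lemma sideP1 (width height x : Int) (hx : x = 0 ∨ x = 2 * width) :
    fP1 (2 * width) (2 * height) x = [] := by
  apply List.flatMap_eq_nil_iff.mpr
  intro y hy
  simp only [eP1]
  split_ifs <;> first | omega | rfl

lemma coreN (width height : Int) (hw : 0 ≤ width) (hh : 0 ≤ height) :
    (PySem.List.pyRange 0 (2 * width + 1) 1).flatMap (fun x => fN (2 * width) (2 * height) x)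
      = (PySem.List.pyRange 1 (2 * width) 2).flatMap
          (fun x => (PySem.List.pyRange 1 (2 * height) 2).map (fun y => (x, y))) := by
  rw [glThin0 _ 2 1 (2 * width + 1) (by norm_num) (fun y hy0 hyn hne => by
    by_contra hodd
    apply hne
    simp only [fN]
    apply List.flatMap_eq_nil_iff.mpr
    intro z hz
    simp only [eN, glMod2]
    split_ifs with h1 h2 <;> first | rfl | omega)]
  rw [show ((1:Int) % 2) = 1 by norm_num]
  rw [glClipTop' _ 2 (2 * width + 1) (2 * width) 1 (by norm_num) (by omega) (by omega) (fun y hy => by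
    simp only [fN]
    apply List.flatMap_eq_nil_iff.mpr
    intro z hz
    simp only [eN]
    split_ifs with h1 h2 <;> first | rfl | omega)]
  apply List.flatMap_congr
  intro x hx
  have hxm := (PySem.List.mem_pyRange_iff_of_pos (by norm_num) x).mp hx
  obtain ⟨hx1, hx2, k, hk⟩ := hxm
  simp only [fN]
  rw [glThin0 _ 2 1 (2 * height + 1) (by norm_num) (fun y hy0 hyn hne => by
    by_contra hodd
    apply hne
    simp only [eN, glMod2]
    split_ifs with h1 h2 <;> first | rfl | omega)]
  rw [show ((1:Int) % 2) = 1 by norm_num]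
  rw [glClipTop' _ 2 (2 * height + 1) (2 * height) 1 (by norm_num) (by omega) (by omega) (fun y hy => by
    simp only [eN]
    split_ifs with h1 h2 <;> first | rfl | omega)]
  rw [List.map_eq_flatMap]
  apply List.flatMap_congr
  intro y hy
  have hym := (PySem.List.mem_pyRange_iff_of_pos (by norm_num) y).mp hy
  obtain ⟨hy1, hy2, j, hj⟩ := hym
  simp only [eN, glMod2]
  split_ifs with h1 h2 <;> first | rfl | omega

-- ===== the sorted2 characterization =====

def glBefore (p q : glPair) : Bool :=
  decide (p.1.1 < q.1.1) || (!decide (q.1.1 < p.1.1) && decide (p.1.2 < q.1.2))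

lemma glSorted2_foldl (xs : List glPair) :
    PySem.List.sorted2 xs (fun c => c.1.1) (fun c => c.1.2) false
      = xs.foldl (fun acc x => PySem.List.insertBy glBefore x acc) [] := rfl

lemma glBefore_iff (p q : glPair) :
    glBefore p q = true ↔ (p.1.1 < q.1.1 ∨ (p.1.1 = q.1.1 ∧ p.1.2 < q.1.2)) := by
  simp only [glBefore, Bool.or_eq_true, Bool.and_eq_true, Bool.not_eq_eq_eq_not, Bool.not_true,
    decide_eq_true_eq, decide_eq_false_iff_not]
  constructor
  · rintro (h | ⟨h1, h2⟩)
    · exact Or.inl h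
    · by_cases hc : p.1.1 < q.1.1
      · exact Or.inl hc
      · exact Or.inr ⟨by omega, h2⟩
  · rintro (h | ⟨h1, h2⟩)
    · exact Or.inl h
    · exact Or.inr ⟨by omega, h2⟩

lemma glBefore_false_iff (p q : glPair) :
    glBefore p q = false ↔ ¬ (p.1.1 < q.1.1 ∨ (p.1.1 = q.1.1 ∧ p.1.2 < q.1.2)) := by
  rw [← glBefore_iff]
  cases glBefore p q <;> simp

lemma glBefore_asym {p q : glPair} (h : glBefore p q = true) : glBefore q p = false := by
  rw [glBefore_iff] at h
  rw [glBefore_false_iff]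
  omega

lemma glBefore_shift {p q r : glPair} (h1 : glBefore p q = true) (h2 : glBefore r q = false) :
    glBefore r p = false := by
  rw [glBefore_iff] at h1
  rw [glBefore_false_iff] at h2 ⊢
  omega

lemma glPairwise_insertBy (x : glPair) :
    ∀ (acc : List glPair), acc.Pairwise (fun a b => glBefore b a = false) →
      (PySem.List.insertBy glBefore x acc).Pairwise (fun a b => glBefore b a = false) := by
  intro acc
  induction acc with
  | nil => intro _; simp [PySem.List.insertBy]
  | cons y ys ih =>
      intro h
      rw [PySem.List.insertBy]
      by_cases hxy : glBefore x y = true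
      · rw [if_pos hxy]
        refine List.Pairwise.cons ?_ h
        intro z hz
        rcases List.mem_cons.mp hz with rfl | hz'
        · exact glBefore_asym hxy
        · exact glBefore_shift hxy (List.rel_of_pairwise_cons h hz')
      · rw [if_neg hxy]
        refine List.Pairwise.cons ?_ (ih (List.Pairwise.of_cons h))
        intro z hz
        rcases (PySem.List.mem_insertBy glBefore x z ys).mp hz with rfl | hz'
        · simpa using hxy
        · exact List.rel_of_pairwise_cons h hz'

lemma glPairwise_foldl (xs : List glPair) :
    ∀ (acc : List glPair), acc.Pairwise (fun a b => glBefore b a = false) →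
      (xs.foldl (fun acc x => PySem.List.insertBy glBefore x acc) acc).Pairwise
        (fun a b => glBefore b a = false) := by
  induction xs with
  | nil => intro acc h; exact h
  | cons x xs ih => intro acc h; exact ih _ (glPairwise_insertBy x acc h)

lemma glLex_of_not_rev {a b : glPair} (hne : a.1 ≠ b.1) (h : glBefore b a = false) : glLex a b := by
  rw [glBefore_false_iff] at h
  simp only [glLex]
  by_cases h1 : a.1.1 < b.1.1
  · exact Or.inl h1
  · have hfe : a.1.1 = b.1.1 := by omega
    by_cases h2 : a.1.2 < b.1.2
    · exact Or.inr ⟨hfe, h2⟩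
    · exfalso
      apply hne
      have hse : a.1.2 = b.1.2 := by omega
      exact Prod.ext hfe hse

lemma glSorted2_eq (xs ys : List glPair) (hperm : ys.Perm xs) (hpw : ys.Pairwise glLex) :
    PySem.List.sorted2 xs (fun c => c.1.1) (fun c => c.1.2) false = ys := by
  set r := PySem.List.sorted2 xs (fun c => c.1.1) (fun c => c.1.2) false with hr
  have hrx : r.Perm xs := PySem.List.sorted2_perm xs _ _ false
  have hry : r.Perm ys := hrx.trans hperm.symm
  have hS : r.Pairwise (fun a b => glBefore b a = false) := by
    rw [hr, glSorted2_foldl]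
    exact glPairwise_foldl xs [] (List.Pairwise.nil)
  have hQy : ys.Pairwise (fun a b => a.1 ≠ b.1) := by
    refine hpw.imp ?_
    intro a b hab
    rcases hab with h | ⟨h1, h2⟩
    · intro he; rw [he] at h; omega
    · intro he
      have : a.1.2 = b.1.2 := by rw [he]
      omega
  have hQr : r.Pairwise (fun a b => a.1 ≠ b.1) :=
    ((List.Perm.pairwise_iff (fun h => Ne.symm h) hry).mpr hQy)
  have hLr : r.Pairwise glLex :=
    (hS.and hQr).imp (fun hab => glLex_of_not_rev hab.2 hab.1)
  refine List.eq_of_perm_of_sorted ?_ hLr hpw hry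
  intro a b _ _ hab hba
  exfalso
  simp only [glLex] at hab hba
  omega

-- ===== linking B's region lists to the column decomposition =====

lemma glFlatMapIf {α : Type} (p : Int → Prop) [DecidablePred p] (t : Int → α) (l : List Int) :
    l.flatMap (fun x => if p x then [t x] else [])
      = (l.filter (fun x => decide (p x))).map t := by
  induction l with
  | nil => rfl
  | cons a l ih =>
      simp only [List.flatMap_cons, List.filter_cons, ih]
      by_cases h : p a <;> simp [h]

lemma glFilter4 : ∀ (k : Nat) (a b r : Int), a % 2 = 0 → (r = 0 ∨ r = 2) → b - a ≤ (k : Int) →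
    (PySem.List.pyRange a b 2).filter (fun x => decide (x % 4 = r))
      = PySem.List.pyRange (a + (r - a) % 4) b 4 := by
  intro k
  induction k with
  | zero =>
      intro a b r h2 hr hk
      rw [glRange_nil (by norm_num) (by omega),
        glRange_nil (by norm_num) (by have : 0 ≤ (r - a) % 4 := Int.emod_nonneg _ (by norm_num); omega)]
      rfl
  | succ k ih =>
      intro a b r h2 hr hk
      by_cases hab : a < b
      · rw [glRange_cons (by norm_num) hab, List.filter_cons]
        by_cases h : a % 4 = r
        · have hmod : (r - a) % 4 = 0 := by omega
          have hmod2 : (r - (a + 2)) % 4 = 2 := by omega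
          rw [if_pos (by simpa using h), ih (a + 2) b r (by omega) hr (by omega), hmod2, hmod,
            add_zero, glRange_cons (s := 4) (by norm_num) hab,
            show a + 2 + 2 = a + 4 from by ring]
        · have hmod : (r - a) % 4 = 2 := by omega
          have hmod2 : (r - (a + 2)) % 4 = 0 := by omega
          rw [if_neg (by simpa using h), ih (a + 2) b r (by omega) hr (by omega), hmod2, hmod]
          norm_num
      · rw [glRange_nil (by norm_num) (by omega),
          glRange_nil (by norm_num) (by have : 0 ≤ (r - a) % 4 := Int.emod_nonneg _ (by norm_num); omega)]
        rfl

lemma glTopEq (lw : Int) :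
    (PySem.List.pyRange 2 lw 2).flatMap tP
      = (PySem.List.pyRange 4 lw 4).map
          (fun x => ((x, (0 : Int)), [(x, (0 : Int)), (x - 1, (1 : Int)), (x + 1, (1 : Int))])) := by
  rw [show (PySem.List.pyRange 2 lw 2).flatMap tP
      = (PySem.List.pyRange 2 lw 2).flatMap
          (fun x => if x % 4 = 0 then
            [((x, (0 : Int)), [(x, (0 : Int)), (x - 1, (1 : Int)), (x + 1, (1 : Int))])] else [])
      from rfl,
    glFlatMapIf (fun x => x % 4 = 0) _ _,
    glFilter4 (lw - 2).toNat 2 lw 0 (by norm_num) (Or.inl rfl) (by omega)]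
  norm_num

lemma glBotEq (height lw lh : Int) :
    (PySem.List.pyRange 2 lw 2).flatMap (bPc height lh)
      = (PySem.List.pyRange (if PySem.Int.mod height 2 = 0 then 4 else 2) lw 4).map
          (fun x => ((x, lh), [(x, lh), (x - 1, lh - 1), (x + 1, lh - 1)])) := by
  rw [show (PySem.List.pyRange 2 lw 2).flatMap (bPc height lh)
      = (PySem.List.pyRange 2 lw 2).flatMap
          (fun x => if x % 4 = (if height % 2 = 0 then 0 else 2) then
            [((x, lh), [(x, lh), (x - 1, lh - 1), (x + 1, lh - 1)])] else [])
      from rfl,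
    glFlatMapIf (fun x => x % 4 = (if height % 2 = 0 then 0 else 2)) _ _,
    glFilter4 (lw - 2).toNat 2 lw (if height % 2 = 0 then 0 else 2) (by norm_num)
      (by split_ifs <;> simp) (by omega), glMod2]
  by_cases h : height % 2 = 0 <;> simp [h] <;> norm_num

lemma glPermFlatMapAppend {α β : Type} (f g : α → List β) (l : List α) :
    (l.flatMap (fun x => f x ++ g x)).Perm (l.flatMap f ++ l.flatMap g) := by
  induction l with
  | nil => simp
  | cons a l ih =>
      simp only [List.flatMap_cons]
      have h1 : ((f a ++ g a) ++ l.flatMap (fun x => f x ++ g x)).Perm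
          ((f a ++ g a) ++ (l.flatMap f ++ l.flatMap g)) := ih.append_left _
      refine h1.trans ?_
      rw [show (f a ++ g a) ++ (l.flatMap f ++ l.flatMap g)
          = f a ++ ((g a ++ l.flatMap f) ++ l.flatMap g) from by simp [List.append_assoc]]
      have h2 : ((g a ++ l.flatMap f) ++ l.flatMap g).Perm
          ((l.flatMap f ++ g a) ++ l.flatMap g) := (List.perm_append_comm).append_right _
      refine (h2.append_left (f a)).trans ?_
      rw [show f a ++ ((l.flatMap f ++ g a) ++ l.flatMap g)
          = (f a ++ l.flatMap f) ++ (g a ++ l.flatMap g) from by simp [List.append_assoc]]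

-- ===== pairwise order of the column-major lists =====

lemma glRangePairwise {a b s : Int} (hs : 0 < s) :
    (PySem.List.pyRange a b s).Pairwise (· < ·) := by
  rw [PySem.List.pyRange_of_pos a b hs, List.pairwise_map]
  exact List.pairwise_lt_range.imp (fun {i j} hij => by
    have : s * (i : Int) < s * (j : Int) := by
      apply mul_lt_mul_of_pos_left _ hs
      exact_mod_cast hij
    omega)

lemma mem_tP {p : glPair} {x : Int} (h : p ∈ tP x) : p.1 = (x, 0) := by
  simp only [tP] at h
  split_ifs at h
  · simp at h; rw [h]
  · simp at h

lemma mem_bPc {p : glPair} {height lh x : Int} (h : p ∈ bPc height lh x) : p.1 = (x, lh) := by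
  by_cases hc : x % 4 = (if height % 2 = 0 then 0 else 2)
  · simp only [bPc, if_pos hc, List.mem_singleton] at h
    rw [h]
  · simp only [bPc, if_neg hc] at h
    cases h

lemma mem_sP {p : glPair} {lh x : Int} (h : p ∈ sP lh x) :
    p.1.1 = x ∧ 2 ≤ p.1.2 ∧ p.1.2 < lh := by
  simp only [sP, List.mem_map] at h
  obtain ⟨y, hy, rfl⟩ := h
  obtain ⟨h1, h2, _⟩ := (PySem.List.mem_pyRange_iff_of_pos (by norm_num) y).mp hy
  exact ⟨rfl, h1, h2⟩

lemma mem_colM {p : glPair} {height lh x : Int} (hlh : 0 ≤ lh) (h : p ∈ colM height lh x) :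
    p.1.1 = x ∧ 0 ≤ p.1.2 ∧ p.1.2 ≤ lh := by
  simp only [colM, List.mem_append] at h
  rcases h with (h | h) | h
  · rw [mem_tP h]; exact ⟨rfl, le_rfl, hlh⟩
  · obtain ⟨h1, h2, h3⟩ := mem_sP h; exact ⟨h1, by omega, by omega⟩
  · rw [mem_bPc h]; exact ⟨rfl, hlh, le_rfl⟩

lemma mem_lPc {p : glPair} {lh : Int} (h : p ∈ lPc lh) :
    p.1.1 = 0 ∧ 2 ≤ p.1.2 ∧ p.1.2 < lh := by
  simp only [lPc, List.mem_map] at h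
  obtain ⟨y, hy, rfl⟩ := h
  obtain ⟨h1, h2, _⟩ := (PySem.List.mem_pyRange_iff_of_pos (by norm_num) y).mp hy
  exact ⟨rfl, h1, h2⟩

lemma mem_rPc {p : glPair} {width lw lh : Int} (h : p ∈ rPc width lw lh) :
    p.1.1 = lw ∧ 2 ≤ p.1.2 ∧ p.1.2 < lh := by
  simp only [rPc, List.mem_map] at h
  obtain ⟨y, hy, rfl⟩ := h
  obtain ⟨h1, h2, _⟩ := (PySem.List.mem_pyRange_iff_of_pos (by norm_num) y).mp hy
  refine ⟨rfl, ?_, h2⟩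
  show (2:Int) ≤ y
  split_ifs at h1 <;> omega

lemma pairwise_map_snd_lt {lh x : Int} {mk : Int → glPair} (hmk : ∀ y, (mk y).1 = (x, y)) :
    ∀ {a s : Int}, 0 < s → ((PySem.List.pyRange a lh s).map mk).Pairwise glLex := by
  intro a s hs
  rw [List.pairwise_map]
  refine (glRangePairwise hs).imp ?_
  intro i j hij
  right
  rw [hmk i, hmk j]
  exact ⟨rfl, hij⟩

lemma pairwise_colM {height lh x : Int} (hlh : 2 ≤ lh) : (colM height lh x).Pairwise glLex := by
  simp only [colM]
  rw [List.pairwise_append]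
  refine ⟨?_, ?_, ?_⟩
  · rw [List.pairwise_append]
    refine ⟨?_, pairwise_map_snd_lt (fun y => rfl) (by norm_num), ?_⟩
    · simp only [tP]; split_ifs <;> simp
    · intro a ha b hb
      obtain ⟨h1, h2, h3⟩ := mem_sP hb
      have ha1 := mem_tP ha
      right
      rw [ha1]
      exact ⟨h1.symm, show (0:Int) < b.1.2 by omega⟩
  · simp only [bPc]; split_ifs <;> simp
  · intro a ha b hb
    have hb1 := mem_bPc hb
    rcases List.mem_append.mp ha with h | h
    · have ha1 := mem_tP h
      right
      rw [ha1, hb1]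
      exact ⟨rfl, show (0:Int) < lh by omega⟩
    · obtain ⟨h1, h2, h3⟩ := mem_sP h
      right
      rw [hb1]
      exact ⟨h1, show a.1.2 < lh by omega⟩

lemma pairwise_glM {width height lw lh : Int} (hw : 2 ≤ lw) (hlh : 2 ≤ lh) :
    (glM width height lw lh).Pairwise glLex := by
  simp only [glM]
  rw [List.pairwise_append]
  refine ⟨?_, pairwise_map_snd_lt (fun y => rfl) (by norm_num), ?_⟩
  · rw [List.pairwise_append]
    refine ⟨pairwise_map_snd_lt (x := 0) (fun y => rfl) (by norm_num), ?_, ?_⟩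
    · rw [List.pairwise_flatMap]
      refine ⟨fun a _ => pairwise_colM hlh, ?_⟩
      refine (glRangePairwise (by norm_num)).imp ?_
      intro x1 x2 h12 a ha b hb
      have ha' := (mem_colM (by omega) ha).1
      have hb' := (mem_colM (by omega) hb).1
      left; omega
    · intro a ha b hb
      obtain ⟨ha1, ha2, ha3⟩ := mem_lPc ha
      obtain ⟨x, hx, hbx⟩ := List.mem_flatMap.mp hb
      obtain ⟨hx1, hx2, _⟩ := (PySem.List.mem_pyRange_iff_of_pos (by norm_num) x).mp hx
      have hb' := (mem_colM (by omega) hbx).1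
      left; omega
  · intro a ha b hb
    obtain ⟨hb1, hb2, hb3⟩ := mem_rPc hb
    rcases List.mem_append.mp ha with h | h
    · obtain ⟨h1, _, _⟩ := mem_lPc h
      left; omega
    · obtain ⟨x, hx, hax⟩ := List.mem_flatMap.mp h
      obtain ⟨hx1, hx2, _⟩ := (PySem.List.mem_pyRange_iff_of_pos (by norm_num) x).mp hx
      have ha' := (mem_colM (by omega) hax).1
      left; omega

lemma glSublistFlatMap {α β : Type} (f g : α → List β) (l : List α)
    (h : ∀ x ∈ l, (f x).Sublist (g x)) : (l.flatMap f).Sublist (l.flatMap g) := by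
  induction l with
  | nil => simp
  | cons a l ih =>
      simp only [List.flatMap_cons]
      exact (h a (by simp)).append (ih (fun x hx => h x (List.mem_cons_of_mem a hx)))

lemma glE_sublist_glM (width height lw lh : Int) :
    (glE width height lw lh).Sublist (glM width height lw lh) := by
  simp only [glE, glM]
  refine List.Sublist.append (List.Sublist.append (List.Sublist.refl _) ?_) (List.Sublist.refl _)
  apply glSublistFlatMap
  intro x _
  simp only [colM]
  exact List.Sublist.append (List.sublist_append_left _ _) (List.Sublist.refl _)

-- ===== main-case assembly =====

lemma glColsSplit {α : Type} (g : Int → List α) {lw : Int} (hw : 2 ≤ lw) (he : lw % 2 = 0) :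
    (PySem.List.pyRange 0 (lw + 1) 2).flatMap g
      = g 0 ++ ((PySem.List.pyRange 2 lw 2).flatMap g ++ g lw) := by
  rw [glRange_append (m := lw) (by norm_num) (by omega) (by omega) (by omega),
    glRange_cons (a := lw) (by norm_num) (by omega), glRange_nil (a := lw + 2) (by norm_num) (by omega),
    glRange_cons (a := 0) (by norm_num) (by omega)]
  simp

lemma glPerm_mid (height lw lh : Int) :
    ((PySem.List.pyRange 2 lw 2).flatMap (colM height lh)).Perm
      ((PySem.List.pyRange 2 lw 2).flatMap (fun x => tP x ++ bPc height lh x)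
        ++ (PySem.List.pyRange 2 lw 2).flatMap (sP lh)) := by
  have h2 : ((PySem.List.pyRange 2 lw 2).flatMap (colM height lh)).Perm
      ((PySem.List.pyRange 2 lw 2).flatMap (fun x => tP x ++ sP lh x)
        ++ (PySem.List.pyRange 2 lw 2).flatMap (bPc height lh)) :=
    glPermFlatMapAppend (fun x => tP x ++ sP lh x) (bPc height lh) (PySem.List.pyRange 2 lw 2)
  have h3 : ((PySem.List.pyRange 2 lw 2).flatMap (fun x => tP x ++ sP lh x)).Perm
      ((PySem.List.pyRange 2 lw 2).flatMap tP ++ (PySem.List.pyRange 2 lw 2).flatMap (sP lh)) :=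
    glPermFlatMapAppend tP (sP lh) (PySem.List.pyRange 2 lw 2)
  have h4 : ((PySem.List.pyRange 2 lw 2).flatMap (fun x => tP x ++ bPc height lh x)).Perm
      ((PySem.List.pyRange 2 lw 2).flatMap tP ++ (PySem.List.pyRange 2 lw 2).flatMap (bPc height lh)) :=
    glPermFlatMapAppend tP (bPc height lh) (PySem.List.pyRange 2 lw 2)
  refine (h2.trans ((h3.append_right _).trans ?_)).trans
    ((h4.symm).append_right ((PySem.List.pyRange 2 lw 2).flatMap (sP lh)))
  rw [show ((PySem.List.pyRange 2 lw 2).flatMap tP ++ (PySem.List.pyRange 2 lw 2).flatMap (sP lh))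
        ++ (PySem.List.pyRange 2 lw 2).flatMap (bPc height lh)
      = (PySem.List.pyRange 2 lw 2).flatMap tP
        ++ ((PySem.List.pyRange 2 lw 2).flatMap (sP lh)
          ++ (PySem.List.pyRange 2 lw 2).flatMap (bPc height lh)) from by simp [List.append_assoc],
    show ((PySem.List.pyRange 2 lw 2).flatMap tP
          ++ (PySem.List.pyRange 2 lw 2).flatMap (bPc height lh))
        ++ (PySem.List.pyRange 2 lw 2).flatMap (sP lh)
      = (PySem.List.pyRange 2 lw 2).flatMap tP
        ++ ((PySem.List.pyRange 2 lw 2).flatMap (bPc height lh)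
          ++ (PySem.List.pyRange 2 lw 2).flatMap (sP lh)) from by simp [List.append_assoc]]
  exact (List.perm_append_comm).append_left _

lemma glPerm_M_ES (width height lw lh : Int) :
    (glM width height lw lh).Perm
      (glE width height lw lh ++ (PySem.List.pyRange 2 lw 2).flatMap (sP lh)) := by
  simp only [glM, glE]
  have h1 := glPerm_mid height lw lh
  have step1 : ((lPc lh ++ (PySem.List.pyRange 2 lw 2).flatMap (colM height lh))
      ++ rPc width lw lh).Perm
      ((lPc lh ++ ((PySem.List.pyRange 2 lw 2).flatMap (fun x => tP x ++ bPc height lh x)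
        ++ (PySem.List.pyRange 2 lw 2).flatMap (sP lh))) ++ rPc width lw lh) :=
    (h1.append_left (lPc lh)).append_right _
  refine step1.trans ?_
  rw [show (lPc lh ++ ((PySem.List.pyRange 2 lw 2).flatMap (fun x => tP x ++ bPc height lh x)
        ++ (PySem.List.pyRange 2 lw 2).flatMap (sP lh))) ++ rPc width lw lh
      = (lPc lh ++ (PySem.List.pyRange 2 lw 2).flatMap (fun x => tP x ++ bPc height lh x))
        ++ ((PySem.List.pyRange 2 lw 2).flatMap (sP lh) ++ rPc width lw lh)
      from by simp [List.append_assoc]]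
  have step2 : ((PySem.List.pyRange 2 lw 2).flatMap (sP lh) ++ rPc width lw lh).Perm
      (rPc width lw lh ++ (PySem.List.pyRange 2 lw 2).flatMap (sP lh)) := List.perm_append_comm
  refine (step2.append_left _).trans ?_
  rw [show (lPc lh ++ (PySem.List.pyRange 2 lw 2).flatMap (fun x => tP x ++ bPc height lh x))
        ++ (rPc width lw lh ++ (PySem.List.pyRange 2 lw 2).flatMap (sP lh))
      = ((lPc lh ++ (PySem.List.pyRange 2 lw 2).flatMap (fun x => tP x ++ bPc height lh x))
        ++ rPc width lw lh) ++ (PySem.List.pyRange 2 lw 2).flatMap (sP lh)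
      from by simp [List.append_assoc]]

lemma glPerm_E_regions (width height lw lh : Int) :
    (glE width height lw lh).Perm
      ((((PySem.List.pyRange 2 lw 2).flatMap tP ++ lPc lh)
        ++ (PySem.List.pyRange 2 lw 2).flatMap (bPc height lh)) ++ rPc width lw lh) := by
  simp only [glE]
  have h1 : ((PySem.List.pyRange 2 lw 2).flatMap (fun x => tP x ++ bPc height lh x)).Perm
      ((PySem.List.pyRange 2 lw 2).flatMap tP ++ (PySem.List.pyRange 2 lw 2).flatMap (bPc height lh)) :=
    glPermFlatMapAppend tP (bPc height lh) (PySem.List.pyRange 2 lw 2)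
  have step1 := (h1.append_left (lPc lh)).append_right (rPc width lw lh)
  refine step1.trans ?_
  rw [show (lPc lh ++ ((PySem.List.pyRange 2 lw 2).flatMap tP
        ++ (PySem.List.pyRange 2 lw 2).flatMap (bPc height lh))) ++ rPc width lw lh
      = ((lPc lh ++ (PySem.List.pyRange 2 lw 2).flatMap tP)
        ++ (PySem.List.pyRange 2 lw 2).flatMap (bPc height lh)) ++ rPc width lw lh
      from by simp [List.append_assoc]]
  exact ((List.perm_append_comm.append_right _).append_right _)

lemma coreD' (width height : Int) (hw : 1 ≤ width) (hh : 1 ≤ height) :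
    (PySem.List.pyRange 0 (2 * width + 1) 1).flatMap
      (fun x => fD (2 * width) (2 * height) height width x)
      = (glM width height (2 * width) (2 * height)).map Prod.fst := by
  rw [glThin0 _ 2 0 (2 * width + 1) (by norm_num) (fun x hx0 hxn hne => by
      by_contra hodd
      apply hne
      simp only [fD]
      apply List.flatMap_eq_nil_iff.mpr
      intro y hy
      simp only [eD, glC1d, glC2d, glMod2, glMod4]
      split_ifs <;> first | omega | rfl | simp),
    show ((0:Int) % 2) = 0 by norm_num,
    glColsSplit _ (by omega) (by omega),
    leftD width height hw (by omega),
    rightD width height (by omega) (by omega)]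
  have hmid : (PySem.List.pyRange 2 (2 * width) 2).flatMap
      (fun x => fD (2 * width) (2 * height) height width x)
      = ((PySem.List.pyRange 2 (2 * width) 2).flatMap (colM height (2 * height))).map Prod.fst := by
    rw [List.map_flatMap]
    apply List.flatMap_congr
    intro x hx
    obtain ⟨hx1, hx2, j, hj⟩ := (PySem.List.mem_pyRange_iff_of_pos (by norm_num) x).mp hx
    exact midD width height x hh (by omega) (by omega) (by omega)
  rw [hmid]
  simp [glM, List.map_append]

lemma coreP0' (width height : Int) (hw : 1 ≤ width) (hh : 1 ≤ height) :
    (PySem.List.pyRange 0 (2 * width + 1) 1).flatMap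
      (fun x => fP0 (2 * width) (2 * height) height width x)
      = (glE width height (2 * width) (2 * height)).map Prod.snd := by
  rw [glThin0 _ 2 0 (2 * width + 1) (by norm_num) (fun x hx0 hxn hne => by
      by_contra hodd
      apply hne
      simp only [fP0]
      apply List.flatMap_eq_nil_iff.mpr
      intro y hy
      simp only [eP0, glC1p, glC2p, glMod2, glMod4]
      split_ifs <;> first | omega | rfl | simp),
    show ((0:Int) % 2) = 0 by norm_num,
    glColsSplit _ (by omega) (by omega),
    leftP0 width height hw (by omega),
    rightP0 width height (by omega) (by omega)]
  have hmid : (PySem.List.pyRange 2 (2 * width) 2).flatMap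
      (fun x => fP0 (2 * width) (2 * height) height width x)
      = ((PySem.List.pyRange 2 (2 * width) 2).flatMap
          (fun x => tP x ++ bPc height (2 * height) x)).map Prod.snd := by
    rw [List.map_flatMap]
    apply List.flatMap_congr
    intro x hx
    obtain ⟨hx1, hx2, j, hj⟩ := (PySem.List.mem_pyRange_iff_of_pos (by norm_num) x).mp hx
    exact midP0 width height x hh (by omega) (by omega) (by omega)
  rw [hmid]
  simp [glE, List.map_append]

lemma coreP1' (width height : Int) (hw : 1 ≤ width) (hh : 1 ≤ height) :
    (PySem.List.pyRange 0 (2 * width + 1) 1).flatMap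
      (fun x => fP1 (2 * width) (2 * height) x)
      = ((PySem.List.pyRange 2 (2 * width) 2).flatMap (sP (2 * height))).map Prod.snd := by
  rw [glThin0 _ 2 0 (2 * width + 1) (by norm_num) (fun x hx0 hxn hne => by
      by_contra hodd
      apply hne
      simp only [fP1]
      apply List.flatMap_eq_nil_iff.mpr
      intro y hy
      simp only [eP1, glMod2]
      split_ifs <;> first | omega | rfl),
    show ((0:Int) % 2) = 0 by norm_num,
    glColsSplit _ (by omega) (by omega),
    sideP1 width height 0 (Or.inl rfl),
    sideP1 width height (2 * width) (Or.inr rfl)]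
  have hmid : (PySem.List.pyRange 2 (2 * width) 2).flatMap
      (fun x => fP1 (2 * width) (2 * height) x)
      = ((PySem.List.pyRange 2 (2 * width) 2).flatMap (sP (2 * height))).map Prod.snd := by
    rw [List.map_flatMap]
    apply List.flatMap_congr
    intro x hx
    obtain ⟨hx1, hx2, j, hj⟩ := (PySem.List.mem_pyRange_iff_of_pos (by norm_num) x).mp hx
    exact midP1 width height x hh (by omega) (by omega) (by omega)
  rw [hmid]
  simp

lemma gen_layout_main (width height : Int) (hw : 1 ≤ width) (hh : 1 ≤ height) :
    gen_layout width height = gen_layout_alt width height := by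
  have hlw : (2:Int) ≤ 2 * width := by omega
  have hlh : (2:Int) ≤ 2 * height := by omega
  rw [genA_eq, coreN width height (by omega) (by omega),
    coreD' width height hw hh, coreP0' width height hw hh, coreP1' width height hw hh]
  simp only [gen_layout_alt, if_neg (show ¬(width ≤ 0 ∨ height ≤ 0) by omega)]
  have hedges : PySem.List.sorted2
      (List.map (fun x => ((x, 0), [(x, 0), (x - 1, 1), (x + 1, 1)])) (PySem.List.pyRange 4 (2 * width) 4)
        ++ List.map (fun y => ((0, y), [(0, y), (1, y + 1), (1, y - 1)])) (PySem.List.pyRange 2 (2 * height) 4)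
        ++ List.map (fun x => ((x, 2 * height), [(x, 2 * height), (x - 1, 2 * height - 1), (x + 1, 2 * height - 1)]))
            (PySem.List.pyRange (if PySem.Int.mod height 2 = 0 then 4 else 2) (2 * width) 4)
        ++ List.map (fun y => ((2 * width, y), [(2 * width, y), (2 * width - 1, y - 1), (2 * width - 1, y + 1)]))
            (PySem.List.pyRange (if PySem.Int.mod width 2 = 1 then 4 else 2) (2 * height) 4))
      (fun c => c.1.1) (fun c => c.1.2) false = glE width height (2 * width) (2 * height) := by
    apply glSorted2_eq
    · rw [← glTopEq (2 * width), ← glBotEq height (2 * width) (2 * height)]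
      exact glPerm_E_regions width height (2 * width) (2 * height)
    · exact List.Pairwise.sublist (glE_sublist_glM _ _ _ _) (pairwise_glM hlw hlh)
  have hdual : PySem.List.sorted2
      (glE width height (2 * width) (2 * height)
        ++ List.flatMap
            (fun x => List.map
              (fun y => ((x, y), [(x - 1, y + 1), (x - 1, y - 1), (x + 1, y - 1), (x + 1, y + 1)]))
              (PySem.List.pyRange 2 (2 * height) 2))
            (PySem.List.pyRange 2 (2 * width) 2))
      (fun c => c.1.1) (fun c => c.1.2) false = glM width height (2 * width) (2 * height) := by
    apply glSorted2_eq
    · exact glPerm_M_ES width height (2 * width) (2 * height)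
    · exact pairwise_glM hlw hlh
  rw [hedges, hdual]
  rfl

-- ===== degenerate cases =====

lemma genA_neg_w (width height : Int) (h : width < 0) : gen_layout width height = ([], [], []) := by
  have : PySem.List.pyRange 0 (width * 2 + 1) 1 = [] := PySem.List.pyRange_one_eq_nil (by omega)
  simp [gen_layout, this]

lemma genA_neg_h (width height : Int) (h : height < 0) : gen_layout width height = ([], [], []) := by
  have : PySem.List.pyRange 0 (height * 2 + 1) 1 = [] := PySem.List.pyRange_one_eq_nil (by omega)
  simp [gen_layout, this]

-- ===== VERDICT (by name: the statement is the Claim_ definition above) =====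
theorem gen_layout_spec : Claim_unchanged_gen_layout := by
  intro width height _hdom hnd
  show gen_layout width height = gen_layout_alt width height
  by_cases hmain : 1 ≤ width ∧ 1 ≤ height
  · exact gen_layout_main width height hmain.1 hmain.2
  · have hB : gen_layout_alt width height = ([], [], []) := by
      simp [gen_layout_alt, if_pos (show width ≤ 0 ∨ height ≤ 0 by omega)]
    rw [hB]
    by_cases hwn : width < 0
    · exact genA_neg_w width height hwn
    · by_cases hhn : height < 0
      · exact genA_neg_h width height hhn
      · have hcases : (width = 0 ∧ (height = 0 ∨ height = 1)) ∨
            (height = 0 ∧ (width = 0 ∨ width = 1 ∨ width = 2)) := by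
          unfold D_gen_layout at hnd
          omega
        rcases hcases with ⟨rfl, rfl | rfl⟩ | ⟨rfl, rfl | rfl | rfl⟩ <;> decide

theorem gen_layout_tight : Claim_exact_gen_layout := by
  intro width height _hdom hd heq
  have hB : gen_layout_alt width height = ([], [], []) := by
    simp only [gen_layout_alt, if_pos (show width ≤ 0 ∨ height ≤ 0 by
      unfold D_gen_layout at hd; omega)]
  rw [hB, genA_eq] at heq
  have hdual : (PySem.List.pyRange 0 (2 * width + 1) 1).flatMap
      (fun x => fD (2 * width) (2 * height) height width x) = [] := congrArg (fun t => t.2.1) heq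
  unfold D_gen_layout at hd
  rcases hd with ⟨rfl, hh2⟩ | ⟨rfl, hw3⟩
  · have hx : (0:Int) ∈ PySem.List.pyRange 0 (2 * 0 + 1) 1 :=
      (PySem.List.mem_pyRange_iff_of_pos (by norm_num) 0).mpr ⟨le_rfl, by norm_num, one_dvd _⟩
    have hy : (2:Int) ∈ PySem.List.pyRange 0 (2 * height + 1) 1 :=
      (PySem.List.mem_pyRange_iff_of_pos (by norm_num) 2).mpr ⟨by norm_num, by omega, one_dvd _⟩
    have he : ((0:Int), (2:Int)) ∈ eD (2 * 0) (2 * height) height 0 0 2 := by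
      simp only [eD, glC1d, glC2d, glMod2, glMod4]
      split_ifs <;> first | (exfalso; omega) | simp
    have hmem : ((0:Int), (2:Int)) ∈ (PySem.List.pyRange 0 (2 * 0 + 1) 1).flatMap
        (fun x => fD (2 * 0) (2 * height) height 0 x) :=
      List.mem_flatMap.mpr ⟨0, hx, List.mem_flatMap.mpr ⟨2, hy, he⟩⟩
    rw [hdual] at hmem
    cases hmem
  · have hx : (4:Int) ∈ PySem.List.pyRange 0 (2 * width + 1) 1 :=
      (PySem.List.mem_pyRange_iff_of_pos (by norm_num) 4).mpr ⟨by norm_num, by omega, one_dvd _⟩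
    have hy : (0:Int) ∈ PySem.List.pyRange 0 (2 * 0 + 1) 1 :=
      (PySem.List.mem_pyRange_iff_of_pos (by norm_num) 0).mpr ⟨le_rfl, by norm_num, one_dvd _⟩
    have he : ((4:Int), (0:Int)) ∈ eD (2 * width) (2 * 0) 0 width 4 0 := by
      simp only [eD, glC1d, glC2d, glMod2, glMod4]
      split_ifs <;> first | (exfalso; omega) | simp
    have hmem : ((4:Int), (0:Int)) ∈ (PySem.List.pyRange 0 (2 * width + 1) 1).flatMap
        (fun x => fD (2 * width) (2 * 0) 0 width x) :=
      List.mem_flatMap.mpr ⟨4, hx, List.mem_flatMap.mpr ⟨0, hy, he⟩⟩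
    rw [hdual] at hmem
    cases hmem

theorem gen_layout_changed : Claim_changed_gen_layout := by
  unfold Claim_changed_gen_layout; decide
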